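-- pv_equiv track=rewrite | github.com/sunsetsobserver/chain-of-thoughts | chain_of_thoughts_3.py | nearest_pc_pitch
-- ===== SOURCE A (Python) =====
-- def nearest_pc_pitch(target_pc: int, guess_p: int) -> int:
--     """Move guess to nearest pitch class target_pc (± a few semitones)."""
--     candidates = [guess_p + k for k in (-12,-11,-10,-9,-8,-7,-6,-5,-4,-3,-2,-1,0,1,2,3,4,5,6,7,8,9,10,11,12)]
--     best, bestd = guess_p, 999
--     for c in candidates:
--         if c % 12 == target_pc:
--             d = abs(c - guess_p)
--             if d < bestd:
--                 best, bestd = c, d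
--     return best
-- ===== SOURCE B (Python) =====
-- def nearest_pc_pitch(target_pc: int, guess_p: int) -> int:
--     """Move guess to nearest pitch class target_pc (± a few semitones)."""
--     if not (0 <= target_pc < 12):
--         return guess_p
--     diff = (target_pc - guess_p) % 12
--     if diff < 6:
--         return guess_p + diff
--     if diff > 6:
--         return guess_p + diff - 12
--     return guess_p - 6
-- ===== Notes on version B (the rewrite author's own statement) =====
-- stated objective: simpler
-- what changed: Replaces the 25-candidate scan with best/bestd bookkeeping by a modular closed form: diff = (target_pc - guess_p) % 12 picked up or down with the tie at 6 resolved downward, matching A exactly.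
import Mathlib
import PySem

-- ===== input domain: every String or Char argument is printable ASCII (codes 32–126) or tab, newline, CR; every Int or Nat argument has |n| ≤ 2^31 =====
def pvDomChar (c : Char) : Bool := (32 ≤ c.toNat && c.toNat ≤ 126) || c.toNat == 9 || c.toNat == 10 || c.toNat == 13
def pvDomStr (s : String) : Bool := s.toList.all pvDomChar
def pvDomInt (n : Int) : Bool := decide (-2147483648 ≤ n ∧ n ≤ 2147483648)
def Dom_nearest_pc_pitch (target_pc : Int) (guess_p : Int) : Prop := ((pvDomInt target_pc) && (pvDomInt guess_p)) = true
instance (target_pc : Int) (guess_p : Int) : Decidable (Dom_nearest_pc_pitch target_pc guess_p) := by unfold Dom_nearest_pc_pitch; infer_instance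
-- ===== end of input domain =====

-- B replaces A's 25-candidate scan by a modular closed form ((target_pc - guess_p) % 12, tie at 6 resolved downward); objective: simpler.


-- ===== PORT A =====
-- the loop body of A's 'for c in candidates'
def pcStep (target_pc guess_p : Int) (s : Int × Int) (c : Int) : Int × Int :=
  if PySem.Int.mod c 12 = target_pc then
    if |c - guess_p| < s.2 then (c, |c - guess_p|) else s
  else s

def pcKs : List Int := [-12,-11,-10,-9,-8,-7,-6,-5,-4,-3,-2,-1,0,1,2,3,4,5,6,7,8,9,10,11,12]

def nearest_pc_pitch (target_pc : Int) (guess_p : Int) : Int :=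
  let candidates := pcKs.map (fun k => guess_p + k)
  (candidates.foldl (pcStep target_pc guess_p) (guess_p, 999)).1

-- ===== PORT B =====
def nearest_pc_pitch_alt (target_pc : Int) (guess_p : Int) : Int :=
  if ¬ (0 ≤ target_pc ∧ target_pc < 12) then guess_p
  else
    let diff := PySem.Int.mod (target_pc - guess_p) 12
    if diff < 6 then guess_p + diff
    else if diff > 6 then guess_p + diff - 12
    else guess_p - 6

-- ===== PRECONDITION & SPEC =====
def Spec_nearest_pc_pitch (target_pc : Int) (guess_p : Int) (out : Int) : Prop := out = nearest_pc_pitch_alt target_pc guess_p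
instance (target_pc : Int) (guess_p : Int) (out : Int) : Decidable (Spec_nearest_pc_pitch target_pc guess_p out) := by unfold Spec_nearest_pc_pitch; infer_instance

-- ===== CLAIM (what is proved, stated in full; the proofs are below) =====
def Claim_equal_nearest_pc_pitch : Prop := ∀ (target_pc : Int) (guess_p : Int), Dom_nearest_pc_pitch target_pc guess_p → Spec_nearest_pc_pitch target_pc guess_p (nearest_pc_pitch target_pc guess_p)

-- ===== LEMMAS AND PROOFS =====

-- when no candidate's pitch class matches, the fold keeps its initial state
theorem pcFold_none (t g : Int) (ht : ¬ (0 ≤ t ∧ t < 12)) :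
    ∀ (cs : List Int) (s : Int × Int), cs.foldl (pcStep t g) s = s := by
  intro cs
  induction cs with
  | nil => intro s; rfl
  | cons c cs ih =>
      intro s
      have hm : ¬ PySem.Int.mod c 12 = t := by
        have h1 : 0 ≤ PySem.Int.mod c 12 := PySem.Int.mod_nonneg c (by norm_num)
        have h2 : PySem.Int.mod c 12 < 12 := PySem.Int.mod_lt c (by norm_num)
        omega
      have hstep : pcStep t g s c = s := by unfold pcStep; rw [if_neg hm]
      rw [List.foldl_cons, hstep, ih]

-- the scan is translation-invariant: shifting guess by g shifts the result by g,
-- once the match condition is rephrased to the residue r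
theorem pcFold_shift (t g r : Int)
    (hc : ∀ k : Int, PySem.Int.mod (g + k) 12 = t ↔ PySem.Int.mod k 12 = r) :
    ∀ (ks : List Int) (b d : Int),
      ((ks.map (fun k => g + k)).foldl (pcStep t g) (g + b, d)).1
        = g + (ks.foldl (pcStep r 0) (b, d)).1 := by
  intro ks
  induction ks with
  | nil => intro b d; rfl
  | cons k ks ih =>
      intro b d
      rw [List.map_cons, List.foldl_cons, List.foldl_cons,
        show ∀ s c, pcStep t g s c
            = if PySem.Int.mod c 12 = t then (if |c - g| < s.2 then (c, |c - g|) else s) else s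
          from fun _ _ => rfl,
        show ∀ s c, pcStep r 0 s c
            = if PySem.Int.mod c 12 = r then (if |c - 0| < s.2 then (c, |c - 0|) else s) else s
          from fun _ _ => rfl]
      have habs : g + k - g = k - 0 := by ring
      by_cases hk : PySem.Int.mod k 12 = r
      · have hk' : PySem.Int.mod (g + k) 12 = t := (hc k).mpr hk
        rw [if_pos hk, if_pos hk', habs]
        by_cases hd : |k - 0| < d
        · rw [if_pos hd, if_pos hd]; exact ih k (|k - 0|)
        · rw [if_neg hd, if_neg hd]; exact ih b d
      · have hk' : ¬ PySem.Int.mod (g + k) 12 = t := fun h => hk ((hc k).mp h)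
        rw [if_neg hk, if_neg hk']
        exact ih b d

theorem nearest_eq (t g : Int) : nearest_pc_pitch t g = nearest_pc_pitch_alt t g := by
  by_cases ht : 0 ≤ t ∧ t < 12
  · -- reduce both sides to the residue r = (t - g) % 12 at guess 0
    have h12 : (0:Int) < 12 := by norm_num
    generalize hre : PySem.Int.mod (t - g) 12 = r
    have hr0 : 0 ≤ r := by rw [← hre]; exact PySem.Int.mod_nonneg _ h12
    have hr1 : r < 12 := by rw [← hre]; exact PySem.Int.mod_lt _ h12
    have hre' : (t - g) % 12 = r := by
      rw [← PySem.Int.mod_eq_emod_of_pos h12]; exact hre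
    have hc : ∀ k : Int, PySem.Int.mod (g + k) 12 = t ↔ PySem.Int.mod k 12 = r := by
      intro k
      rw [PySem.Int.mod_eq_emod_of_pos h12, PySem.Int.mod_eq_emod_of_pos h12]
      omega
    have hA : nearest_pc_pitch t g = g + nearest_pc_pitch r 0 := by
      show ((pcKs.map (fun k => g + k)).foldl (pcStep t g) (g, 999)).1
            = g + ((pcKs.map (fun k => (0:Int) + k)).foldl (pcStep r 0) (0, 999)).1
      have hmap : pcKs.map (fun k => (0:Int) + k) = pcKs := by
        simp [pcKs]
      rw [hmap]
      have := pcFold_shift t g r hc pcKs 0 999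
      simpa using this
    have hB : nearest_pc_pitch_alt t g = g + nearest_pc_pitch_alt r 0 := by
      unfold nearest_pc_pitch_alt
      rw [PySem.Int.mod_eq_emod_of_pos h12, PySem.Int.mod_eq_emod_of_pos h12, hre',
        show (r - 0) % 12 = r by omega,
        if_neg (not_not_intro ht), if_neg (not_not_intro ⟨hr0, hr1⟩)]
      show (if r < 6 then g + r else if r > 6 then g + r - 12 else g - 6)
        = g + (if r < 6 then 0 + r else if r > 6 then 0 + r - 12 else 0 - 6)
      split_ifs <;> omega
    have key : nearest_pc_pitch r 0 = nearest_pc_pitch_alt r 0 := by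
      interval_cases r <;> decide
    rw [hA, hB, key]
  · -- target_pc outside 0..11: no candidate matches, both return guess_p
    simp only [nearest_pc_pitch, nearest_pc_pitch_alt, pcFold_none t g ht, if_pos ht]

-- ===== VERDICT (by name: the statement is the Claim_ definition above) =====
theorem nearest_pc_pitch_spec : Claim_equal_nearest_pc_pitch := by
  intro t g _
  show nearest_pc_pitch t g = nearest_pc_pitch_alt t g
  exact nearest_eq t g
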